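-- pv_equiv track=rewrite | github.com/Graduation-project-SBME-2023/liver-imaging-analysis | liver_imaging_analysis/engine/utils.py | stringify_dictionary
-- ===== SOURCE A (Python) =====
-- def stringify_dictionary(dictionary, indent=""):
--     result = ""
--     for key, value in dictionary.items():
--         if isinstance(value, dict):
--             result += f"{indent}{key}:\n"
--             result += stringify_dictionary(value, indent + "  ")
--         else:
--             result += f"{indent}{key}: {value}\n"
--     return result
-- ===== SOURCE B (Python) =====
-- def stringify_dictionary(dictionary, indent=""):
--     pieces = []
--     stack = [(k, v, indent) for k, v in list(dictionary.items())[::-1]]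
--     while stack:
--         key, value, ind = stack.pop()
--         if isinstance(value, dict):
--             pieces.append(f"{ind}{key}:\n")
--             stack.extend((k, v, ind + "  ") for k, v in list(value.items())[::-1])
--         else:
--             pieces.append(f"{ind}{key}: {value}\n")
--     return "".join(pieces)
-- ===== Notes on version B (the rewrite author's own statement) =====
-- stated objective: alternative
-- what changed: Replaced A's recursion and string accumulator with an explicit-stack iterative pre-order traversal: a work stack of (key, value, indent) triples is seeded with the top-level items reversed, popped entries either emit a line into a pieces list or push their children reversed with a deeper indent, and the pieces are joined once at the end.
import Mathlib
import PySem

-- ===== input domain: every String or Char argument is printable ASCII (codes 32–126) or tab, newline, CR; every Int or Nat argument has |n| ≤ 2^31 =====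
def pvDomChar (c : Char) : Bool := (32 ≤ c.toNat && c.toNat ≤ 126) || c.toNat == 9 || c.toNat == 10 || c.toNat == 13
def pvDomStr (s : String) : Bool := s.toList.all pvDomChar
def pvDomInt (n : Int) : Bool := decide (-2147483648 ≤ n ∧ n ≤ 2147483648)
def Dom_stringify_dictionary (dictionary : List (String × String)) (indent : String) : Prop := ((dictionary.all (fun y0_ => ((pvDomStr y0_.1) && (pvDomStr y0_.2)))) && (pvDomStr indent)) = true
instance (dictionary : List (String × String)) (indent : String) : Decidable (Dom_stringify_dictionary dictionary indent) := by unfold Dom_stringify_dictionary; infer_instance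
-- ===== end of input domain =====

-- B replaces A's recursion and string accumulator by an explicit-stack iterative
-- traversal (pop (key,value,indent) triples from a work stack seeded with the items
-- reversed, collect lines in a pieces list, join once); alternative decomposition,
-- same cost. Under the type convention dict[str, str] → List (String × String) the
-- values are strings, so the `isinstance(value, dict)` branch of either Python never
-- fires in these ports.

-- ===== PORT A =====
-- result = ""; for key, value in dictionary.items(): result += f"{indent}{key}: {value}\n"
def stringify_dictionary (dictionary : List (String × String)) (indent : String) : String :=
  dictionary.foldl (fun result kv => result ++ (indent ++ kv.1 ++ ": " ++ kv.2 ++ "\n")) ""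

-- ===== PORT B =====
-- while stack: key, value, ind = stack.pop(); pieces.append(f"{ind}{key}: {value}\n")
-- (stack.pop() removes the LAST entry; the dict branch is unreachable on String values)
def pvGo (stack : List (String × String × String)) (pieces : List String) : List String :=
  match h : stack.getLast? with
  | none => pieces
  | some (key, value, ind) =>
      pvGo stack.dropLast (pieces ++ [ind ++ key ++ ": " ++ value ++ "\n"])
termination_by stack.length
decreasing_by
  have hne : stack ≠ [] := by intro hnil; simp [hnil] at h
  have := List.length_pos_of_ne_nil hne
  simp [List.length_dropLast]; omega

-- stack = [(k, v, indent) for k, v in list(dictionary.items())[::-1]]; return "".join(pieces)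
def stringify_dictionary_alt (dictionary : List (String × String)) (indent : String) : String :=
  PySem.Str.join "" (pvGo ((dictionary.map (fun kv => (kv.1, kv.2, indent))).reverse) [])

-- ===== PRECONDITION & SPEC =====
def Spec_stringify_dictionary (dictionary : List (String × String)) (indent : String) (out : String) : Prop := out = stringify_dictionary_alt dictionary indent
instance (dictionary : List (String × String)) (indent : String) (out : String) : Decidable (Spec_stringify_dictionary dictionary indent out) := by unfold Spec_stringify_dictionary; infer_instance

-- ===== CLAIM =====
def Claim_equal_stringify_dictionary : Prop := ∀ (dictionary : List (String × String)) (indent : String), Dom_stringify_dictionary dictionary indent → Spec_stringify_dictionary dictionary indent (stringify_dictionary dictionary indent)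

-- ===== LEMMAS AND PROOFS =====

-- popping the reversed stack processes the original list front to back: the pieces
-- pvGo collects from l.reverse are exactly the lines of l in order.
theorem pvGo_reverse (l : List (String × String × String)) (ps : List String) :
    pvGo l.reverse ps = ps ++ l.map (fun t => t.2.2 ++ t.1 ++ ": " ++ t.2.1 ++ "\n") := by
  induction l generalizing ps with
  | nil => simp [pvGo]
  | cons x xs ih =>
    rw [List.reverse_cons, ← List.concat_eq_append, pvGo]
    split
    · next h => simp at h
    · next key value ind h =>
        simp only [List.concat_eq_append, List.getLast?_append_cons,
          List.getLast?_cons, Option.some_inj, List.getLast?_nil,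
          Option.getD_none, List.dropLast_concat] at h ⊢
        subst h
        simp [ih]

-- joining with the empty separator is flattening (on the character lists)
theorem pv_flatten_intersperse_nil (l : List (List Char)) :
    (List.intersperse ([] : List Char) l).flatten = l.flatten := by
  induction l with
  | nil => rfl
  | cons x xs ih =>
    cases xs with
    | nil => rfl
    | cons y ys => simpa [List.intersperse] using ih

theorem pv_join_empty_toList (l : List String) :
    (PySem.Str.join "" l).toList = (l.map String.toList).flatten := by
  simp [PySem.Str.join, PySem.Chars.join, List.intercalate, pv_flatten_intersperse_nil]

theorem pv_foldl_toList (l : List (String × String)) (indent acc : String) :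
    (l.foldl (fun result kv => result ++ (indent ++ kv.1 ++ ": " ++ kv.2 ++ "\n")) acc).toList
      = acc.toList ++ (l.map (fun kv => (indent ++ kv.1 ++ ": " ++ kv.2 ++ "\n").toList)).flatten := by
  induction l generalizing acc with
  | nil => simp
  | cons kv rest ih => simp [ih]

-- ===== VERDICT =====
theorem stringify_dictionary_spec : Claim_equal_stringify_dictionary := by
  intro dictionary indent _
  show _ = _
  apply String.toList_inj.mp
  rw [stringify_dictionary, stringify_dictionary_alt, pvGo_reverse,
    pv_foldl_toList, pv_join_empty_toList]
  simp [List.map_map, Function.comp_def]
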